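-- pv_equiv track=rewrite | github.com/pypi-data/pypi-mirror-68 | packages/scaffan/scaffan-0.22.0.tar.gz/scaffan-0.22.0/scaffan/annotation.py | annotation_colors
-- ===== SOURCE A (Python) =====
-- def annotation_colors(annotations):
--     # titles = {}
--     colors = {}
--     for i, an in enumerate(annotations):
--         title = an["color"]
--         title = title.upper()
--         if title in colors:
--
--             colors[title].append(i)
--         else:
--             colors[title] = [i]
--
--     return colors
-- ===== SOURCE B (Python) =====
-- def annotation_colors(annotations):
--     # Two-pass: uppercase all colors once, dedup in first-occurrence order,
--     # then collect each color's indices with a per-color scan.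
--     ups = [an["color"].upper() for an in annotations]
--     return {c: [i for i, u in enumerate(ups) if u == c] for c in dict.fromkeys(ups)}
-- ===== Notes on version B (the rewrite author's own statement) =====
-- stated objective: alternative
-- what changed: Replaces the single-pass hashed dict accumulation with a two-pass scheme: map colors to uppercase, dedup keys in first-occurrence order, then build each color's index list by a per-color comprehension scan.
import Mathlib
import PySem

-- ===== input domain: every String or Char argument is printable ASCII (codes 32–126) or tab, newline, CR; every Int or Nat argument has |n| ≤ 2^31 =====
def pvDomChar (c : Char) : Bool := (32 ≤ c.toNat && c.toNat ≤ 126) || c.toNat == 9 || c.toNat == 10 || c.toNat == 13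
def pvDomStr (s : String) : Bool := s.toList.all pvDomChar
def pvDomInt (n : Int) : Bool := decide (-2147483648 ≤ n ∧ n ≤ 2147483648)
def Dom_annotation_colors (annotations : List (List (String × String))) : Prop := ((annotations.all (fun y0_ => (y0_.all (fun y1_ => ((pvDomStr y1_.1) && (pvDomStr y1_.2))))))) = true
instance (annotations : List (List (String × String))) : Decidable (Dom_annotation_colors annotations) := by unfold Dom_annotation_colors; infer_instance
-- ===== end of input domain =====

-- B builds the result by mapping colors to uppercase, deduping keys in first-occurrence
-- order and scanning per color, instead of A's single-pass hashed dict accumulation.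

-- ===== PORT A =====
-- A's dict is returned as its items list (assoc list in insertion order).
def annotation_colors (annotations : List (List (String × String))) : List (String × List Int) :=
  ((PySem.List.enumerate annotations 0).foldl
    (fun (colors : PySem.Dict String (List Int)) p =>
      let title := PySem.Str.upper ((PySem.Dict.mk p.2).getD "color" "")
      if colors.contains title then
        colors.insert title (colors.getD title [] ++ [p.1])   -- colors[title].append(i)
      else
        colors.insert title [p.1])
    PySem.Dict.empty).items

-- ===== PORT B =====
-- B's dict comprehension runs over the distinct keys 'dedup ups', so it is the
-- corresponding assoc list directly.
def annotation_colors_alt (annotations : List (List (String × String))) : List (String × List Int) :=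
  let ups := annotations.map (fun an => PySem.Str.upper ((PySem.Dict.mk an).getD "color" ""))
  (PySem.List.dedup ups).map (fun c =>
    (c, (PySem.List.enumerate ups 0).filterMap (fun p => if p.2 == c then some p.1 else none)))

-- ===== PRECONDITION & SPEC =====
-- Pre_ excludes exactly the inputs where A raises KeyError: an annotation without a "color" key.
def Pre_annotation_colors (annotations : List (List (String × String))) : Prop :=
  ∀ an ∈ annotations, (PySem.Dict.mk an).contains "color" = true
instance (annotations : List (List (String × String))) : Decidable (Pre_annotation_colors annotations) := by unfold Pre_annotation_colors; infer_instance
def pvWitness_annotation_colors : (List (List (String × String))) := [[("color", "red")], [("color", "Blue")], [("color", "RED")]]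
def Spec_annotation_colors (annotations : List (List (String × String))) (out : List (String × List Int)) : Prop := out = annotation_colors_alt annotations
instance (annotations : List (List (String × String))) (out : List (String × List Int)) : Decidable (Spec_annotation_colors annotations out) := by unfold Spec_annotation_colors; infer_instance

-- ===== CLAIM (what is proved, stated in full; the proofs are below) =====
def Claim_equal_annotation_colors : Prop := ∀ (annotations : List (List (String × String))), Dom_annotation_colors annotations → Pre_annotation_colors annotations → Spec_annotation_colors annotations (annotation_colors annotations)

-- ===== LEMMAS AND PROOFS =====

-- A's branch is one modify step.
theorem step_eq_modify (d : PySem.Dict String (List Int)) (t : String) (i : Int) :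
    (if d.contains t then d.insert t (d.getD t [] ++ [i]) else d.insert t [i])
      = d.modify t [] (· ++ [i]) := by
  by_cases h : d.contains t = true
  · simp [h, PySem.Dict.modify]
  · simp only [Bool.not_eq_true] at h
    simp [h, PySem.Dict.modify, PySem.Dict.getD_of_not_contains (h := h)]

theorem enumerate_map {α β : Type} (f : α → β) (xs : List α) (s : Int) :
    PySem.List.enumerate (xs.map f) s = (PySem.List.enumerate xs s).map (fun p => (p.1, f p.2)) := by
  induction xs generalizing s with
  | nil => simp [PySem.List.enumerate_nil]
  | cons x xs ih => simp [PySem.List.enumerate_cons, ih]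

theorem filter_swap_map (l : List (Int × String)) (c : String) :
    ((l.map (fun p => (p.2, p.1))).filter (fun p => p.1 == c)).map (·.2)
      = l.filterMap (fun p => if p.2 == c then some p.1 else none) := by
  induction l with
  | nil => rfl
  | cons p l ih =>
    by_cases h : p.2 = c
    · simp [h, ih]
    · simp [h, ih]

-- ===== VERDICT (by name: the statement is the Claim_ definition above) =====
theorem annotation_colors_spec : Claim_equal_annotation_colors := by
  intro annotations _ _
  unfold Spec_annotation_colors annotation_colors annotation_colors_alt
  -- rewrite A's fold into a modify-fold over (title, index) pairs
  have hfun : (fun (colors : PySem.Dict String (List Int)) (p : Int × List (String × String)) =>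
      let title := PySem.Str.upper ((PySem.Dict.mk p.2).getD "color" "")
      if colors.contains title then
        colors.insert title (colors.getD title [] ++ [p.1])
      else
        colors.insert title [p.1])
      = (fun (d : PySem.Dict String (List Int)) (p : Int × List (String × String)) =>
          d.modify (PySem.Str.upper ((PySem.Dict.mk p.2).getD "color" "")) [] (· ++ [p.1])) := by
    funext d p
    exact step_eq_modify d _ p.1
  rw [hfun]
  set key : List (String × String) → String :=
    fun an => PySem.Str.upper ((PySem.Dict.mk an).getD "color" "") with hkeydef
  have hLfold : ∀ (l : List (Int × List (String × String))) (d : PySem.Dict String (List Int)),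
      l.foldl (fun d p => d.modify (key p.2) [] (· ++ [p.1])) d
        = (l.map (fun p => (key p.2, p.1))).foldl
            (fun (d : PySem.Dict String (List Int)) q => d.modify q.1 [] (· ++ [q.2])) d := by
    intro l
    induction l with
    | nil => intro d; rfl
    | cons p l ih => intro d; simp only [List.foldl_cons, List.map_cons]; exact ih _
  rw [hLfold]
  set L := (PySem.List.enumerate annotations 0).map (fun p => (key p.2, p.1)) with hL
  set D := L.foldl (fun (d : PySem.Dict String (List Int)) q => d.modify q.1 [] (· ++ [q.2])) PySem.Dict.empty with hD
  have hups : L.map (·.1) = annotations.map key := by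
    rw [hL, List.map_map]
    have hc : ((·.1) ∘ fun p : Int × List (String × String) => (key p.2, p.1))
        = key ∘ (·.2) := rfl
    rw [hc, ← List.map_map, PySem.List.map_snd_enumerate]
  have hkeys : D.keys = PySem.List.dedup (annotations.map key) := by
    rw [hD, PySem.Dict.keys_foldl_modify_key (key := fun q : String × Int => q.1)]
    rw [PySem.Dict.keys_empty, PySem.Set.update_nil_left, hups, PySem.List.dedup_eq_ofList]
  have hnodup : D.keys.Nodup := by rw [hkeys]; exact PySem.List.nodup_dedup _
  have hitems : D.items = D.keys.map (fun k => (k, D.getD k [])) :=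
    PySem.Dict.items_eq_map_keys D hnodup []
  rw [hitems, hkeys]
  refine List.map_congr_left (fun c _ => ?_)
  have hval : D.getD c [] = (L.filter (fun q => q.1 == c)).map (·.2) := by
    rw [hD]
    simpa using PySem.Dict.getD_foldl_modify_append (l := L) (d := PySem.Dict.empty) (c := c)
  rw [hval]
  have hswap : L = ((PySem.List.enumerate annotations 0).map (fun p => (p.1, key p.2))).map
      (fun p => (p.2, p.1)) := by
    rw [hL, List.map_map]; rfl
  rw [hswap, filter_swap_map, ← enumerate_map]
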